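-- pv_equiv track=rewrite | github.com/leolulu/macbookair-files-org | dashapp/video.py | gen_video_url_list
-- ===== SOURCE A (Python) =====
-- def gen_video_url_list(video_url_list):
--     temp_list = []
--     try:
--         for _ in range(10):
--             temp_list.append(video_url_list.pop())
--     except:
--         pass
--     return temp_list
-- ===== SOURCE B (Python) =====
-- def gen_video_url_list(video_url_list):
--     n = min(10, len(video_url_list))
--     temp_list = video_url_list[len(video_url_list) - n:]
--     temp_list.reverse()
--     del video_url_list[len(video_url_list) - n:]
--     return temp_list
-- ===== Notes on version B (the rewrite author's own statement) =====
-- stated objective: simpler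
-- what changed: Replaces the try/except pop-loop with a single length-then-slice: take the last min(10,len) elements, reverse them, and delete that tail, with no loop or exception handling.
import Mathlib
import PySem

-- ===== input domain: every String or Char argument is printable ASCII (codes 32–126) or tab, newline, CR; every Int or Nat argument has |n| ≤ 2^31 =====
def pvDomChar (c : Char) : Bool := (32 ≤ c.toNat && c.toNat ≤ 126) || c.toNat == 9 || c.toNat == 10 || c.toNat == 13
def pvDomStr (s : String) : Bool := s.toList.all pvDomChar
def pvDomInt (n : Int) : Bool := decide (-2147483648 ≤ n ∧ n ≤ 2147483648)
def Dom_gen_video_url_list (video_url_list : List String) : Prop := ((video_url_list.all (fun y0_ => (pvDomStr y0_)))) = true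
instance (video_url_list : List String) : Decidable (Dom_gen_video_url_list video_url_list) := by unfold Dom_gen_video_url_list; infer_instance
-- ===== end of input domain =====

-- B replaces A's try/except pop-loop by length-then-slice (simpler decomposition); both Pythons
-- remove the returned elements from the argument in place — the equivalence proved is about the
-- RETURN value (B's Python performs the same mutation).

-- ===== PORT A =====
-- the for-loop over range(10): each step pops the last element (IndexError on [] is caught by
-- the bare except, which ends the loop and returns temp_list as accumulated)
def pvPopLoop : Nat → List String → List String → List String
  | 0, temp, _ => temp
  | k + 1, temp, lst =>
    match lst.getLast? with
    | none => temp                                   -- pop() raised; except: pass; return temp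
    | some a => pvPopLoop k (temp ++ [a]) lst.dropLast

def gen_video_url_list (video_url_list : List String) : List String :=
  pvPopLoop 10 [] video_url_list

-- ===== PORT B =====
def gen_video_url_list_alt (video_url_list : List String) : List String :=
  let n := min 10 video_url_list.length
  (video_url_list.drop (video_url_list.length - n)).reverse

-- ===== PRECONDITION & SPEC =====
def Spec_gen_video_url_list (video_url_list : List String) (out : List String) : Prop := out = gen_video_url_list_alt video_url_list
instance (video_url_list : List String) (out : List String) : Decidable (Spec_gen_video_url_list video_url_list out) := by unfold Spec_gen_video_url_list; infer_instance

-- ===== CLAIM (what is proved, stated in full; the proofs are below) =====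
def Claim_equal_gen_video_url_list : Prop := ∀ (video_url_list : List String), Dom_gen_video_url_list video_url_list → Spec_gen_video_url_list video_url_list (gen_video_url_list video_url_list)

-- ===== LEMMAS AND PROOFS =====

theorem pvPopLoop_eq (k : Nat) (temp lst : List String) :
    pvPopLoop k temp lst = temp ++ (lst.drop (lst.length - min k lst.length)).reverse := by
  induction k generalizing temp lst with
  | zero => simp [pvPopLoop]
  | succ k ih =>
    rcases List.eq_nil_or_concat lst with rfl | ⟨l, a, rfl⟩
    · simp [pvPopLoop]
    · simp only [List.concat_eq_append]
      have hlast : (l ++ [a]).getLast? = some a := by simp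
      have hdl : (l ++ [a]).dropLast = l := by simp
      rw [pvPopLoop, hlast, hdl]
      show pvPopLoop k (temp ++ [a]) l = _
      rw [ih]
      have hm : (l ++ [a]).length - min (k + 1) (l ++ [a]).length
          = l.length - min k l.length := by
        simp only [List.length_append, List.length_cons, List.length_nil]
        omega
      have hle : l.length - min k l.length ≤ l.length := by omega
      rw [hm, List.drop_append_of_le_length hle]
      simp

-- ===== VERDICT (by name: the statement is the Claim_ definition above) =====
theorem gen_video_url_list_spec : Claim_equal_gen_video_url_list := by
  intro l _
  unfold Spec_gen_video_url_list gen_video_url_list gen_video_url_list_alt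
  rw [pvPopLoop_eq]
  simp
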